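-- pv_equiv track=rewrite | github.com/edu-rinaldi/Python-Homework | Homework Python 2017-18/homework04/es1/program01.py | parentsTree
-- ===== SOURCE A (Python) =====
-- def getGrade(tree,node):
--     return len(tree[node])
--
-- def parentsTree(tree, newTree, index, grade, counter=0):
--     if getGrade(tree, index) == grade:
--         newTree[index] = counter
--         counter += 1
--         for i in tree[index]:
--             newTree[i] = counter
--             parentsTree(tree, newTree, i, grade, counter)
--     else:
--         newTree[index] = counter
--         for i in tree[index]:
--             newTree[i] = counter
--             parentsTree(tree, newTree, i, grade, counter)
--     return newTree
-- ===== SOURCE B (Python) =====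
-- # Iterative re-implementation: explicit LIFO stack of (node, counter) pairs instead of
-- # recursion; writes each node once per visit (A's redundant pre-writes disappear) and
-- # mutates the same newTree in place, like A.
-- def parentsTree(tree, newTree, index, grade, counter=0):
--     stack = [(index, counter)]
--     while stack:
--         node, c = stack.pop()
--         newTree[node] = c
--         children = tree[node]
--         nxt = c + 1 if len(children) == grade else c
--         stack.extend((child, nxt) for child in reversed(children))
--     return newTree
-- ===== Notes on version B (the rewrite author's own statement) =====
-- stated objective: alternative
-- what changed: Replaces A's recursive descent (with duplicated if/else branches, a getGrade helper and a redundant pre-write of every child before recursing into it) by an iterative while-loop over an explicit LIFO stack of (node, counter) pairs that writes each node exactly once per visit.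
import Mathlib
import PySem

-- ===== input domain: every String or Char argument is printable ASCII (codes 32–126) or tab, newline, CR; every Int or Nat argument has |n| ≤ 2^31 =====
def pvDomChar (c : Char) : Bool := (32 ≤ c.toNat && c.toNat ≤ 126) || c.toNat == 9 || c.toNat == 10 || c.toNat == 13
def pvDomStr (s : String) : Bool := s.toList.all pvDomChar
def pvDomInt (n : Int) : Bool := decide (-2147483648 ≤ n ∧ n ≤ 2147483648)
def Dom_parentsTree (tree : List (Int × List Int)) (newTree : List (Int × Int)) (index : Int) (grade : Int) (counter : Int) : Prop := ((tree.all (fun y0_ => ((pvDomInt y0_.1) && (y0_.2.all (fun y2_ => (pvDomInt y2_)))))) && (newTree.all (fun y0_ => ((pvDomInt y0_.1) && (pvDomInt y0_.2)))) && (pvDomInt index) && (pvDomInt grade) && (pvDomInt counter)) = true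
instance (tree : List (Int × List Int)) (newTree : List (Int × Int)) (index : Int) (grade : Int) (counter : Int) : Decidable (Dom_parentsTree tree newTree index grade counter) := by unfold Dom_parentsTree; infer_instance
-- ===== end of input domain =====

-- B replaces A's recursive descent by an explicit LIFO stack loop with a single write per
-- visit (different decomposition, same return value); both Pythons mutate newTree in place.


-- ===== PORT A =====
-- Python A recurses on dicts; ports view the dict arguments through PySem.Dict.ofList and
-- return .items. The recursion carries a depth budget as a totality guard (a truncated call
-- still performs its frame's first write 'newTree[index] = counter'); under Pre_ the budget
-- tree.length is never exhausted. A missing key (Python: KeyError, outside Pre_) returns the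
-- dict unchanged.
def recA (treeD : PySem.Dict Int (List Int)) (grade : Int) : Nat → Int → Int → PySem.Dict Int Int → PySem.Dict Int Int
  | 0, n, c, d =>
    match treeD.get? n with
    | none => d
    | some _ => d.insert n c
  | b + 1, n, c, d =>
    match treeD.get? n with
    | none => d
    | some cs =>
      if (cs.length : Int) = grade then
        cs.foldl (fun acc i => recA treeD grade b i (c + 1) (acc.insert i (c + 1))) (d.insert n c)
      else
        cs.foldl (fun acc i => recA treeD grade b i c (acc.insert i c)) (d.insert n c)

def parentsTree (tree : List (Int × List Int)) (newTree : List (Int × Int)) (index : Int) (grade : Int) (counter : Int) : List (Int × Int) :=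
  (recA (PySem.Dict.ofList tree) grade tree.length index counter (PySem.Dict.ofList newTree)).items

-- ===== PORT B =====
-- largest child-list length of the tree (only used by the stack loop's termination measure)
def pvMaxDeg (treeD : PySem.Dict Int (List Int)) : Nat :=
  (treeD.items.map (fun p => p.2.length)).foldr max 0

theorem pvMaxDeg_le {treeD : PySem.Dict Int (List Int)} {n : Int} {cs : List Int}
    (h : treeD.get? n = some cs) : cs.length ≤ pvMaxDeg treeD := by
  have hmem : (n, cs) ∈ treeD.items := PySem.Dict.mem_items_of_get?_eq_some _ h
  unfold pvMaxDeg
  have : cs.length ∈ treeD.items.map (fun p => p.2.length) :=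
    List.mem_map.mpr ⟨(n, cs), hmem, rfl⟩
  revert this
  generalize treeD.items.map (fun p => p.2.length) = L
  intro hL
  induction L with
  | nil => cases hL
  | cons x xs ih =>
    rcases List.mem_cons.mp hL with h1 | h1
    · subst h1; exact Nat.le_max_left _ _
    · exact le_trans (ih h1) (Nat.le_max_right _ _)

theorem pvSumConst (L : List Int) (m : Nat) : (L.map (fun _ => m)).sum = L.length * m := by
  induction L with
  | nil => simp
  | cons x t ih => simp [Nat.succ_mul, Nat.add_comm]

-- B's while-loop over an explicit stack; each entry carries a depth budget as a totality
-- guard (matching A's port's budget; never exhausted under Pre_). Entries whose node is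
-- missing from the tree (Python: KeyError, outside Pre_) are skipped.
def runB (treeD : PySem.Dict Int (List Int)) (grade : Int) : List (Int × Int × Nat) → PySem.Dict Int Int → PySem.Dict Int Int
  | [], d => d
  | (n, c, b) :: s, d =>
    match h : treeD.get? n with
    | none => runB treeD grade s d
    | some cs =>
      match b with
      | 0 => runB treeD grade s (d.insert n c)
      | b + 1 =>
        runB treeD grade
          (cs.map (fun i => (i, (if (cs.length : Int) = grade then c + 1 else c), b)) ++ s)
          (d.insert n c)
  termination_by stack _ => (stack.map (fun e => (pvMaxDeg treeD + 1) ^ e.2.2)).sum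
  decreasing_by
  · simp only [List.map_cons, List.sum_cons]
    have h1 : 1 ≤ (pvMaxDeg treeD + 1) ^ b := Nat.one_le_pow _ _ (Nat.succ_pos _)
    omega
  · simp only [List.map_cons, List.sum_cons]
    have h1 : 1 ≤ (pvMaxDeg treeD + 1) ^ (0 : Nat) := by simp
    omega
  · simp only [List.map_append, List.map_map, List.sum_append, List.map_cons, List.sum_cons,
      Nat.succ_eq_add_one]
    have hc : ((fun e : Int × Int × Nat => (pvMaxDeg treeD + 1) ^ e.2.2) ∘
        fun i : Int => (i, (if _ : (cs.length : Int) = grade then c + 1 else c), b)) =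
        fun _ : Int => (pvMaxDeg treeD + 1) ^ b := rfl
    rw [hc, pvSumConst]
    have hlen : cs.length ≤ pvMaxDeg treeD := pvMaxDeg_le h
    have hpos : 1 ≤ (pvMaxDeg treeD + 1) ^ b := Nat.one_le_pow _ _ (Nat.succ_pos _)
    have hle : cs.length * (pvMaxDeg treeD + 1) ^ b ≤ pvMaxDeg treeD * (pvMaxDeg treeD + 1) ^ b :=
      Nat.mul_le_mul_right _ hlen
    have hs : (pvMaxDeg treeD + 1) ^ (b + 1) = pvMaxDeg treeD * (pvMaxDeg treeD + 1) ^ b + (pvMaxDeg treeD + 1) ^ b := by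
      rw [pow_succ]; ring
    omega

def parentsTree_alt (tree : List (Int × List Int)) (newTree : List (Int × Int)) (index : Int) (grade : Int) (counter : Int) : List (Int × Int) :=
  (runB (PySem.Dict.ofList tree) grade [(index, counter, tree.length)] (PySem.Dict.ofList newTree)).items

-- ===== PRECONDITION & SPEC =====
-- one step of the children expansion, and its bounded iteration (a computable over-
-- approximation of the set of nodes reachable from the seed)
def pvStep (treeD : PySem.Dict Int (List Int)) (S : PySem.Set Int) : PySem.Set Int :=
  PySem.Set.update S (S.flatMap (fun k => treeD.getD k []))

def pvReach (treeD : PySem.Dict Int (List Int)) : Nat → PySem.Set Int → PySem.Set Int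
  | Nat.zero, S => S
  | Nat.succ m, S => pvReach treeD m (pvStep treeD S)

-- Pre_ = exactly the inputs where Python A returns: every node reachable from index is a key
-- of tree and no reachable node lies on a cycle (otherwise A raises KeyError resp.
-- RecursionError). R is the bounded reachable-set closure; length-of-tree-plus-one rounds saturate it
-- whenever the conditions hold, and the closedness conjunct makes R inductively closed.
def Pre_parentsTree (tree : List (Int × List Int)) (newTree : List (Int × Int)) (index : Int) (grade : Int) (counter : Int) : Prop :=
  index ∈ pvReach (PySem.Dict.ofList tree) tree.length.succ (PySem.Set.ofList [index]) ∧
  ∀ k ∈ pvReach (PySem.Dict.ofList tree) tree.length.succ (PySem.Set.ofList [index]),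
    ((PySem.Dict.ofList tree).get? k).isSome = true ∧
    (∀ i ∈ (PySem.Dict.ofList tree).getD k [], i ∈ pvReach (PySem.Dict.ofList tree) tree.length.succ (PySem.Set.ofList [index])) ∧
    k ∉ pvReach (PySem.Dict.ofList tree) tree.length.succ (PySem.Set.ofList ((PySem.Dict.ofList tree).getD k []))

instance (tree : List (Int × List Int)) (newTree : List (Int × Int)) (index : Int) (grade : Int) (counter : Int) : Decidable (Pre_parentsTree tree newTree index grade counter) := by
  unfold Pre_parentsTree; infer_instance

def pvWitness_parentsTree : (List (Int × List Int)) × (List (Int × Int)) × Int × Int × Int :=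
  ([(0, [1, 2]), (1, [2]), (2, [])], [(5, 7)], 0, 2, 3)

def Spec_parentsTree (tree : List (Int × List Int)) (newTree : List (Int × Int)) (index : Int) (grade : Int) (counter : Int) (out : List (Int × Int)) : Prop := out = parentsTree_alt tree newTree index grade counter
instance (tree : List (Int × List Int)) (newTree : List (Int × Int)) (index : Int) (grade : Int) (counter : Int) (out : List (Int × Int)) : Decidable (Spec_parentsTree tree newTree index grade counter out) := by unfold Spec_parentsTree; infer_instance

-- ===== CLAIM (what is proved, stated in full; the proofs are below) =====
def Claim_equal_parentsTree : Prop := ∀ (tree : List (Int × List Int)) (newTree : List (Int × Int)) (index : Int) (grade : Int) (counter : Int), Dom_parentsTree tree newTree index grade counter → Pre_parentsTree tree newTree index grade counter → Spec_parentsTree tree newTree index grade counter (parentsTree tree newTree index grade counter)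

-- ===== LEMMAS AND PROOFS =====

theorem pvWitness_ok : Pre_parentsTree pvWitness_parentsTree.1 pvWitness_parentsTree.2.1 pvWitness_parentsTree.2.2.1 pvWitness_parentsTree.2.2.2.1 pvWitness_parentsTree.2.2.2.2 := by decide

-- A's recursion is insensitive to the parent loop's redundant pre-write of the child
theorem recA_absorb (treeD : PySem.Dict Int (List Int)) (grade : Int) (b : Nat) (n c : Int)
    (d : PySem.Dict Int Int) {cs : List Int} (h : treeD.get? n = some cs) :
    recA treeD grade b n c (d.insert n c) = recA treeD grade b n c d := by
  cases b with
  | zero => simp [recA, h, PySem.Dict.insert_insert_self]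
  | succ b => simp [recA, h, PySem.Dict.insert_insert_self]

-- popping one stack entry performs exactly one run of A's recursion on it
theorem runB_entry (treeD : PySem.Dict Int (List Int)) (grade : Int) (S : List Int)
    (hS : ∀ k ∈ S, ∃ cs, treeD.get? k = some cs ∧ ∀ i ∈ cs, i ∈ S) :
    ∀ (b : Nat) (n : Int), n ∈ S → ∀ (c : Int) (s : List (Int × Int × Nat)) (d : PySem.Dict Int Int),
      runB treeD grade ((n, c, b) :: s) d = runB treeD grade s (recA treeD grade b n c d) := by
  intro b
  induction b with
  | zero =>
    intro n hn c s d
    obtain ⟨cs, hcs, _⟩ := hS n hn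
    simp only [runB, recA, hcs]
    split <;> simp_all
  | succ b ih =>
    intro n hn c s d
    obtain ⟨cs, hcs, hch⟩ := hS n hn
    have inner : ∀ (nxt : Int) (cs' : List Int), (∀ i ∈ cs', i ∈ S) →
        ∀ (s : List (Int × Int × Nat)) (d : PySem.Dict Int Int),
        runB treeD grade ((cs'.map (fun i => (i, nxt, b))) ++ s) d
          = runB treeD grade s (cs'.foldl (fun acc i => recA treeD grade b i nxt (acc.insert i nxt)) d) := by
      intro nxt cs' hcs' s' d'
      induction cs' generalizing d' with
      | nil => simp
      | cons i rest ihr =>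
        have hiS : i ∈ S := hcs' i (List.mem_cons_self ..)
        obtain ⟨csi, hcsi, _⟩ := hS i hiS
        have habs : recA treeD grade b i nxt (d'.insert i nxt) = recA treeD grade b i nxt d' :=
          recA_absorb treeD grade b i nxt d' hcsi
        calc runB treeD grade (((i :: rest).map (fun j => (j, nxt, b))) ++ s') d'
            = runB treeD grade ((rest.map (fun j => (j, nxt, b))) ++ s') (recA treeD grade b i nxt d') := by
              simp only [List.map_cons, List.cons_append]
              exact ih i hiS nxt _ d'
          _ = runB treeD grade s' (rest.foldl (fun acc j => recA treeD grade b j nxt (acc.insert j nxt)) (recA treeD grade b i nxt d')) :=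
              ihr (fun j hj => hcs' j (List.mem_cons_of_mem _ hj)) _
          _ = runB treeD grade s' ((i :: rest).foldl (fun acc j => recA treeD grade b j nxt (acc.insert j nxt)) d') := by
              rw [List.foldl_cons, habs]
    by_cases hg : (cs.length : Int) = grade
    · calc runB treeD grade ((n, c, b + 1) :: s) d
          = runB treeD grade ((cs.map (fun i => (i, c + 1, b))) ++ s) (d.insert n c) := by
            simp only [runB]
            split <;> simp_all
        _ = runB treeD grade s (cs.foldl (fun acc i => recA treeD grade b i (c + 1) (acc.insert i (c + 1))) (d.insert n c)) :=
            inner (c + 1) cs hch s (d.insert n c)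
        _ = runB treeD grade s (recA treeD grade (b + 1) n c d) := by
            simp [recA, hcs, hg]
    · calc runB treeD grade ((n, c, b + 1) :: s) d
          = runB treeD grade ((cs.map (fun i => (i, c, b))) ++ s) (d.insert n c) := by
            simp only [runB]
            split <;> simp_all
        _ = runB treeD grade s (cs.foldl (fun acc i => recA treeD grade b i c (acc.insert i c)) (d.insert n c)) :=
            inner c cs hch s (d.insert n c)
        _ = runB treeD grade s (recA treeD grade (b + 1) n c d) := by
            simp [recA, hcs, hg]

-- ===== VERDICT (by name: the statement is the Claim_ definition above) =====
theorem parentsTree_spec : Claim_equal_parentsTree := by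
  intro tree newTree index grade counter _ hpre
  obtain ⟨hidx, hR⟩ := hpre
  unfold Spec_parentsTree parentsTree parentsTree_alt
  have hS : ∀ k ∈ pvReach (PySem.Dict.ofList tree) tree.length.succ (PySem.Set.ofList [index]),
      ∃ cs, (PySem.Dict.ofList tree).get? k = some cs ∧
        ∀ i ∈ cs, i ∈ pvReach (PySem.Dict.ofList tree) tree.length.succ (PySem.Set.ofList [index]) := by
    intro k hk
    obtain ⟨h1, h2, _⟩ := hR k hk
    obtain ⟨cs, hcs⟩ := Option.isSome_iff_exists.mp h1
    refine ⟨cs, hcs, ?_⟩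
    intro i hi
    apply h2
    simp only [PySem.Dict.getD, hcs]
    exact hi
  rw [runB_entry (PySem.Dict.ofList tree) grade _ hS tree.length index hidx counter []
        (PySem.Dict.ofList newTree)]
  simp only [runB]
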